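-- pv_equiv track=rewrite | github.com/Jonggil-dev/Algo | 정종길/프로그래머스/카카오 3회독/2024 KAKAO WINTER INTERNSHIP/가장 많이 받은 선물.py | solution
-- ===== SOURCE A (Python) =====
-- def solution(friends, gifts):
--     answer = 0
--     n = len(friends)
--
--     idxs = { name : idx for idx, name in enumerate(friends)}
--     give_to = [[0] * n for _ in range(n)]
--     matrics = [[0] * 3 for _ in range(n)]
--
--     for info in gifts:
--         give, take = info.split()
--         gidx, tidx = idxs[give], idxs[take]
--         give_to[gidx][tidx] += 1
--         matrics[gidx][0] += 1
--         matrics[gidx][2] += 1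
--         matrics[tidx][1] += 1
--         matrics[tidx][2] -= 1
--
--     for g in range(n):
--         next_month = 0
--         for t in range(n):
--             if g == t:
--                 continue
--
--             if give_to[g][t] > give_to[t][g]:
--                 next_month += 1
--
--             elif give_to[g][t] == give_to[t][g]:
--                 if matrics[g][2] > matrics[t][2]:
--                     next_month += 1
--         answer = max(answer, next_month)
--
--     return answer
-- ===== SOURCE B (Python) =====
-- def solution(friends, gifts):
--     n = len(friends)
--     idx = {name: i for i, name in enumerate(friends)}
--     cnt = {}
--     net = [0] * n
--     for info in gifts:
--         a, b = info.split()
--         i, j = idx[a], idx[b]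
--         cnt[(i, j)] = cnt.get((i, j), 0) + 1
--         net[i] += 1
--         net[j] -= 1
--     # rank by net: wins[x] starts as the number of people with strictly smaller net score
--     less = {}
--     for pos, v in enumerate(sorted(net)):
--         if v not in less:
--             less[v] = pos
--     wins = [less[v] for v in net]
--     # correct only the pairs that actually exchanged gifts unequally
--     pairs = {}
--     for (i, j) in cnt:
--         if i != j:
--             pairs[(min(i, j), max(i, j))] = True
--     for (i, j) in pairs:
--         a = cnt.get((i, j), 0)
--         b = cnt.get((j, i), 0)
--         if a != b:
--             if net[i] > net[j]:
--                 wins[i] -= 1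
--             elif net[j] > net[i]:
--                 wins[j] -= 1
--             if a > b:
--                 wins[i] += 1
--             else:
--                 wins[j] += 1
--     return max(wins, default=0)
-- ===== Notes on version B (the rewrite author's own statement) =====
-- stated objective: alternative
-- what changed: A builds an n*n give matrix and rescans every ordered pair per person; B never compares all pairs: it sorts the net gift-index array to give each person a base score equal to their rank (number of strictly smaller nets), then corrects only the sparse set of unordered pairs that actually exchanged gifts unequally (kept in a dict keyed by (i,j)), so the quadratic comparison grid disappears.
import Mathlib
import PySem

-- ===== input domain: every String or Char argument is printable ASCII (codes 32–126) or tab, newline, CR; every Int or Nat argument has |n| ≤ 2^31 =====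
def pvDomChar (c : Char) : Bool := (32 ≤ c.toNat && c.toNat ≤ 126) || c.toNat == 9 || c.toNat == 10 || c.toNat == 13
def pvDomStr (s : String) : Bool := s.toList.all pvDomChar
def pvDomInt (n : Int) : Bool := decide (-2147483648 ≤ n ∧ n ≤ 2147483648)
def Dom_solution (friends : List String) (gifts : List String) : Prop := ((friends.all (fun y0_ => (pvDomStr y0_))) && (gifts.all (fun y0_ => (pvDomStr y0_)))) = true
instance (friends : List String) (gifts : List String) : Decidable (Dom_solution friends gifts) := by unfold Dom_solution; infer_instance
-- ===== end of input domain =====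

-- B avoids A's n*n comparison grid: it ranks people by sorting the net gift-index array
-- (base score = number of strictly smaller nets) and then corrects only the unordered pairs
-- that actually exchanged gifts unequally, kept sparsely in a dict (alternative algorithm).

-- ===== PORT A =====
-- shared indexing helpers (both Pythons read/write `m[i][j]` and build the same name->index dict):
-- `m[i][j]` read with int indices (in range and nonnegative under Pre_, where pyGetD is exact)
def pvGet2 (m : List (List Int)) (i j : Int) : Int :=
  PySem.List.pyGetD (PySem.List.pyGetD m i []) j 0
-- `m[i][j] += …` write; exact for the nonnegative in-range indices produced under Pre_
def pvUpd2 (m : List (List Int)) (i j : Int) (f : Int → Int) : List (List Int) :=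
  m.modify i.toNat (fun row => row.modify j.toNat f)
-- `{ name : idx for idx, name in enumerate(friends) }` (identical line in both Pythons)
def pvIdxs (friends : List String) : PySem.Dict String Int :=
  (PySem.List.enumerate friends).foldl (fun d p => d.insert p.2 p.1) PySem.Dict.empty

def solution (friends : List String) (gifts : List String) : Int :=
  let n := friends.length
  let idxs := pvIdxs friends
  let st := gifts.foldl
    (fun (st : List (List Int) × List (List Int)) info =>
      let parts := PySem.Str.split₀ info
      -- `give, take = info.split()` (exactly two parts under Pre_); `idxs[give]` (present under Pre_)
      let gidx := ((idxs.get? (parts.getD 0 "")).getD 0 : Int)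
      let tidx := ((idxs.get? (parts.getD 1 "")).getD 0 : Int)
      (pvUpd2 st.1 gidx tidx (· + 1),
       pvUpd2 (pvUpd2 (pvUpd2 (pvUpd2 st.2 gidx 0 (· + 1)) gidx 2 (· + 1)) tidx 1 (· + 1)) tidx 2 (· - 1)))
    (List.replicate n (List.replicate n 0), List.replicate n (List.replicate 3 0))
  (PySem.List.pyRange 0 (n : Int) 1).foldl (fun answer g =>
    let next_month := (PySem.List.pyRange 0 (n : Int) 1).foldl (fun nm t =>
      if g = t then nm
      else if pvGet2 st.1 g t > pvGet2 st.1 t g then nm + 1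
      else if pvGet2 st.1 g t = pvGet2 st.1 t g then
        if pvGet2 st.2 g 2 > pvGet2 st.2 t 2 then nm + 1 else nm
      else nm) 0
    max answer next_month) 0

-- ===== PORT B =====
def solution_alt (friends : List String) (gifts : List String) : Int :=
  let n := friends.length
  let idx := pvIdxs friends
  let st := gifts.foldl
    (fun (st : PySem.Dict (Int × Int) Int × List Int) info =>
      let parts := PySem.Str.split₀ info
      let i := ((idx.get? (parts.getD 0 "")).getD 0 : Int)
      let j := ((idx.get? (parts.getD 1 "")).getD 0 : Int)
      -- `cnt[(i, j)] = cnt.get((i, j), 0) + 1`; `net[i] += 1; net[j] -= 1`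
      (st.1.insert (i, j) (st.1.getD (i, j) 0 + 1),
       (st.2.modify i.toNat (· + 1)).modify j.toNat (· - 1)))
    (PySem.Dict.empty, List.replicate n 0)
  let cnt := st.1
  let net := st.2
  -- `for pos, v in enumerate(sorted(net)): if v not in less: less[v] = pos`
  let less := (PySem.List.enumerate (PySem.List.sorted net (fun x => x))).foldl
    (fun (d : PySem.Dict Int Int) p => if d.contains p.2 then d else d.insert p.2 p.1)
    PySem.Dict.empty
  -- `wins = [less[v] for v in net]` (key always present: v comes from net; getD is exact)
  let wins := net.map (fun v => less.getD v 0)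
  -- `for (i, j) in cnt: if i != j: pairs[(min(i,j), max(i,j))] = True`
  let pairs := cnt.keys.foldl
    (fun (d : PySem.Dict (Int × Int) Bool) k =>
      if k.1 ≠ k.2 then d.insert (min k.1 k.2, max k.1 k.2) true else d)
    PySem.Dict.empty
  let wins := pairs.keys.foldl
    (fun (w : List Int) p =>
      let a := cnt.getD (p.1, p.2) 0
      let b := cnt.getD (p.2, p.1) 0
      if a ≠ b then
        let w1 := if PySem.List.pyGetD net p.1 0 > PySem.List.pyGetD net p.2 0 then w.modify p.1.toNat (· - 1)
          else if PySem.List.pyGetD net p.2 0 > PySem.List.pyGetD net p.1 0 then w.modify p.2.toNat (· - 1)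
          else w
        if a > b then w1.modify p.1.toNat (· + 1) else w1.modify p.2.toNat (· + 1)
      else w)
    wins
  PySem.List.maxD wins id 0

-- ===== PRECONDITION & SPEC =====
-- Pre_ excludes exactly the inputs where the Python A raises: a gift entry that does not split
-- into exactly two words (ValueError on unpacking) or mentions a name not in friends (KeyError).
def Pre_solution (friends : List String) (gifts : List String) : Prop :=
  ∀ info ∈ gifts, (PySem.Str.split₀ info).length = 2 ∧ ∀ w ∈ PySem.Str.split₀ info, w ∈ friends
instance (friends : List String) (gifts : List String) : Decidable (Pre_solution friends gifts) := by
  unfold Pre_solution; infer_instance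
def pvWitness_solution : List String × List String := (["ab", "cd"], ["ab cd"])
def Spec_solution (friends : List String) (gifts : List String) (out : Int) : Prop := out = solution_alt friends gifts
instance (friends : List String) (gifts : List String) (out : Int) : Decidable (Spec_solution friends gifts out) := by unfold Spec_solution; infer_instance

-- ===== CLAIM (what is proved, stated in full; the proofs are below) =====
def Claim_equal_solution : Prop := ∀ (friends : List String) (gifts : List String), Dom_solution friends gifts → Pre_solution friends gifts → Spec_solution friends gifts (solution friends gifts)

-- ===== LEMMAS AND PROOFS =====

-- abstract phase-2 of A (what `solution` does after its gift loop)
def pvA2 (G M : List (List Int)) (n : Nat) : Int :=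
  (PySem.List.pyRange 0 (n : Int) 1).foldl (fun answer g =>
    max answer ((PySem.List.pyRange 0 (n : Int) 1).foldl (fun nm t =>
      if g = t then nm
      else if pvGet2 G g t > pvGet2 G t g then nm + 1
      else if pvGet2 G g t = pvGet2 G t g then
        if pvGet2 M g 2 > pvGet2 M t 2 then nm + 1 else nm
      else nm) 0)) 0

-- gift-loop accumulators, componentwise
def pvGive (friends gifts : List String) : List (List Int) :=
  gifts.foldl (fun m info =>
      pvUpd2 m (((pvIdxs friends).get? ((PySem.Str.split₀ info).getD 0 "")).getD 0)
               (((pvIdxs friends).get? ((PySem.Str.split₀ info).getD 1 "")).getD 0) (· + 1))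
    (List.replicate friends.length (List.replicate friends.length 0))

def pvMat (friends gifts : List String) : List (List Int) :=
  gifts.foldl (fun M info =>
      pvUpd2 (pvUpd2 (pvUpd2 (pvUpd2 M (((pvIdxs friends).get? ((PySem.Str.split₀ info).getD 0 "")).getD 0) 0 (· + 1))
              (((pvIdxs friends).get? ((PySem.Str.split₀ info).getD 0 "")).getD 0) 2 (· + 1))
              (((pvIdxs friends).get? ((PySem.Str.split₀ info).getD 1 "")).getD 0) 1 (· + 1))
              (((pvIdxs friends).get? ((PySem.Str.split₀ info).getD 1 "")).getD 0) 2 (· - 1))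
    (List.replicate friends.length (List.replicate 3 0))

def pvNet (friends gifts : List String) : List Int :=
  gifts.foldl (fun net info =>
      (net.modify (((pvIdxs friends).get? ((PySem.Str.split₀ info).getD 0 "")).getD 0 : Int).toNat (· + 1)).modify
        (((pvIdxs friends).get? ((PySem.Str.split₀ info).getD 1 "")).getD 0 : Int).toNat (· - 1))
    (List.replicate friends.length 0)

-- the ordered index pair a gift line denotes (giver index, taker index)
def pvPairF (friends : List String) (info : String) : Int × Int :=
  (((pvIdxs friends).get? ((PySem.Str.split₀ info).getD 0 "")).getD 0,
   ((pvIdxs friends).get? ((PySem.Str.split₀ info).getD 1 "")).getD 0)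

-- B's cnt dict
def pvCntD (friends gifts : List String) : PySem.Dict (Int × Int) Int :=
  gifts.foldl (fun d info => d.insert (pvPairF friends info) (d.getD (pvPairF friends info) 0 + 1)) PySem.Dict.empty

lemma solution_eq (friends gifts : List String) :
    solution friends gifts = pvA2 (pvGive friends gifts) (pvMat friends gifts) friends.length := by
  unfold solution pvA2 pvGive pvMat
  simp only []
  rw [PySem.List.foldl_prod_mk
    (f := fun m info => pvUpd2 m (((pvIdxs friends).get? ((PySem.Str.split₀ info).getD 0 "")).getD 0)
      (((pvIdxs friends).get? ((PySem.Str.split₀ info).getD 1 "")).getD 0) (fun x => x + 1))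
    (g := fun M info => pvUpd2 (pvUpd2 (pvUpd2 (pvUpd2 M
      (((pvIdxs friends).get? ((PySem.Str.split₀ info).getD 0 "")).getD 0) 0 (fun x => x + 1))
      (((pvIdxs friends).get? ((PySem.Str.split₀ info).getD 0 "")).getD 0) 2 (fun x => x + 1))
      (((pvIdxs friends).get? ((PySem.Str.split₀ info).getD 1 "")).getD 0) 1 (fun x => x + 1))
      (((pvIdxs friends).get? ((PySem.Str.split₀ info).getD 1 "")).getD 0) 2 (fun x => x - 1))]

-- B's phase 2 over abstract cnt/net
def pvLess (net : List Int) : PySem.Dict Int Int :=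
  (PySem.List.enumerate (PySem.List.sorted net (fun x => x))).foldl
    (fun (d : PySem.Dict Int Int) p => if d.contains p.2 then d else d.insert p.2 p.1)
    PySem.Dict.empty

def pvWins0 (net : List Int) : List Int := net.map (fun v => (pvLess net).getD v 0)

def pvPairsD (cnt : PySem.Dict (Int × Int) Int) : PySem.Dict (Int × Int) Bool :=
  cnt.keys.foldl
    (fun (d : PySem.Dict (Int × Int) Bool) k =>
      if k.1 ≠ k.2 then d.insert (min k.1 k.2, max k.1 k.2) true else d)
    PySem.Dict.empty

def pvAdj (cnt : PySem.Dict (Int × Int) Int) (net : List Int) (w : List Int) (p : Int × Int) : List Int :=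
  let a := cnt.getD (p.1, p.2) 0
  let b := cnt.getD (p.2, p.1) 0
  if a ≠ b then
    let w1 := if PySem.List.pyGetD net p.1 0 > PySem.List.pyGetD net p.2 0 then w.modify p.1.toNat (· - 1)
      else if PySem.List.pyGetD net p.2 0 > PySem.List.pyGetD net p.1 0 then w.modify p.2.toNat (· - 1)
      else w
    if a > b then w1.modify p.1.toNat (· + 1) else w1.modify p.2.toNat (· + 1)
  else w

def pvB2 (cnt : PySem.Dict (Int × Int) Int) (net : List Int) : Int :=
  PySem.List.maxD ((pvPairsD cnt).keys.foldl (pvAdj cnt net) (pvWins0 net)) id 0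

lemma solution_alt_eq (friends gifts : List String) :
    solution_alt friends gifts = pvB2 (pvCntD friends gifts) (pvNet friends gifts) := by
  unfold solution_alt pvB2 pvCntD pvNet pvWins0 pvLess pvPairsD pvAdj pvPairF
  simp only []
  rw [PySem.List.foldl_prod_mk
    (f := fun (d : PySem.Dict (Int × Int) Int) info =>
      d.insert (((pvIdxs friends).get? ((PySem.Str.split₀ info).getD 0 "")).getD 0,
                ((pvIdxs friends).get? ((PySem.Str.split₀ info).getD 1 "")).getD 0)
        (d.getD (((pvIdxs friends).get? ((PySem.Str.split₀ info).getD 0 "")).getD 0,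
                 ((pvIdxs friends).get? ((PySem.Str.split₀ info).getD 1 "")).getD 0) 0 + 1))
    (g := fun (net : List Int) info => (net.modify (((pvIdxs friends).get? ((PySem.Str.split₀ info).getD 0 "")).getD 0).toNat (fun x => x + 1)).modify
      (((pvIdxs friends).get? ((PySem.Str.split₀ info).getD 1 "")).getD 0).toNat (fun x => x - 1))]

-- column-2 projection (matrics[i][2] is B's net[i]) and the net_eq chain
def pvP (r : List Int) : Int := r.getD 2 0

lemma map_modify_ne2 (M : List (List Int)) (i c : Nat) (hc : c ≠ 2) (f : Int → Int) :
    (M.modify i (fun r => r.modify c f)).map pvP = M.map pvP := by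
  apply List.ext_getElem (by simp)
  intro k h1 h2
  have h1' : k < (M.modify i (fun r => r.modify c f)).length := by simpa using h1
  rw [List.getElem_map, List.getElem_map]
  have := List.getElem?_modify (fun r => r.modify c f) i M k
  rw [List.getElem?_eq_getElem h1', List.getElem?_eq_getElem (by simpa using h2)] at this
  simp only [Option.map_eq_map, Option.map_some, Option.some_inj] at this
  rw [this]
  split
  · simp [pvP, List.getD_eq_getElem?_getD, hc]
  · rfl

lemma map_modify_col2 (M : List (List Int)) (i : Nat) (f : Int → Int)
    (h3 : ∀ r ∈ M, r.length = 3) :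
    (M.modify i (fun r => r.modify 2 f)).map pvP = (M.map pvP).modify i f := by
  apply List.ext_getElem (by simp)
  intro k hk1 hk2
  have hkM : k < M.length := by simpa using hk1
  rw [List.getElem_map]
  have hmod := List.getElem?_modify (fun r => r.modify 2 f) i M k
  rw [List.getElem?_eq_getElem (by simpa using hk1)] at hmod
  have hmod2 := List.getElem?_modify f i (M.map pvP) k
  rw [List.getElem?_eq_getElem hk2, List.getElem?_eq_getElem (by simpa using hk2)] at hmod2
  rw [List.getElem?_eq_getElem hkM] at hmod
  simp only [Option.map_eq_map, Option.map_some, Option.some_inj] at hmod hmod2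
  rw [hmod, hmod2, List.getElem_map]
  have hr3 : M[k].length = 3 := h3 _ (List.getElem_mem hkM)
  split
  · simp [pvP, List.getD_eq_getElem?_getD,
      List.getElem?_eq_getElem (by omega : 2 < M[k].length)]
  · rfl

lemma rows_modify {M : List (List Int)} {i : Nat} {g : List Int → List Int}
    (h3 : ∀ r ∈ M, r.length = 3) (hg : ∀ r, (g r).length = r.length) :
    ∀ r ∈ M.modify i g, r.length = 3 := by
  intro r hr
  rw [List.mem_iff_getElem?] at hr
  obtain ⟨k, hk⟩ := hr
  rw [List.getElem?_modify] at hk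
  cases hMk : M[k]? with
  | none => rw [hMk] at hk; simp only [Option.map_eq_map, Option.map_none] at hk; exact absurd hk (by simp)
  | some row =>
    have hrowM : row ∈ M := List.mem_of_getElem? hMk
    rw [hMk] at hk
    simp only [Option.map_eq_map, Option.map_some, Option.some_inj] at hk
    split at hk
    · rw [← hk, hg]; exact h3 _ hrowM
    · rw [← hk]; exact h3 _ hrowM

lemma mat_step_map (M : List (List Int)) (a b : Int) (h3 : ∀ r ∈ M, r.length = 3) :
    (pvUpd2 (pvUpd2 (pvUpd2 (pvUpd2 M a 0 (· + 1)) a 2 (· + 1)) b 1 (· + 1)) b 2 (· - 1)).map pvP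
      = ((M.map pvP).modify a.toNat (· + 1)).modify b.toNat (· - 1) := by
  unfold pvUpd2
  have t0 : (0 : Int).toNat = 0 := rfl
  have t1 : (1 : Int).toNat = 1 := rfl
  have t2 : (2 : Int).toNat = 2 := rfl
  rw [t0, t1, t2]
  have h3a : ∀ r ∈ M.modify a.toNat (fun r => r.modify 0 (· + 1)), r.length = 3 :=
    rows_modify h3 (fun r => List.length_modify _ _ _)
  have h3b : ∀ r ∈ (M.modify a.toNat (fun r => r.modify 0 (· + 1))).modify a.toNat (fun r => r.modify 2 (· + 1)), r.length = 3 :=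
    rows_modify h3a (fun r => List.length_modify _ _ _)
  have h3c : ∀ r ∈ ((M.modify a.toNat (fun r => r.modify 0 (· + 1))).modify a.toNat (fun r => r.modify 2 (· + 1))).modify b.toNat (fun r => r.modify 1 (· + 1)), r.length = 3 :=
    rows_modify h3b (fun r => List.length_modify _ _ _)
  rw [map_modify_col2 _ _ _ h3c, map_modify_ne2 _ _ _ (by omega),
    map_modify_col2 _ _ _ h3a, map_modify_ne2 _ _ _ (by omega)]

lemma matnet_aux (gi ti : String → Int) (l : List String) :
    ∀ (M : List (List Int)), (∀ r ∈ M, r.length = 3) →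
    (l.foldl (fun M info =>
        pvUpd2 (pvUpd2 (pvUpd2 (pvUpd2 M (gi info) 0 (· + 1)) (gi info) 2 (· + 1)) (ti info) 1 (· + 1)) (ti info) 2 (· - 1)) M).map pvP
      = l.foldl (fun net info => (net.modify (gi info).toNat (· + 1)).modify (ti info).toNat (· - 1)) (M.map pvP) := by
  induction l with
  | nil => intro M h3; rfl
  | cons info l ih =>
    intro M h3
    simp only [List.foldl_cons]
    have h3' : ∀ r ∈ pvUpd2 (pvUpd2 (pvUpd2 (pvUpd2 M (gi info) 0 (· + 1)) (gi info) 2 (· + 1)) (ti info) 1 (· + 1)) (ti info) 2 (· - 1), r.length = 3 := by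
      unfold pvUpd2
      exact rows_modify (rows_modify (rows_modify (rows_modify h3
        (fun r => List.length_modify _ _ _)) (fun r => List.length_modify _ _ _))
        (fun r => List.length_modify _ _ _)) (fun r => List.length_modify _ _ _)
    rw [ih _ h3', mat_step_map _ _ _ h3]

lemma net_eq (friends gifts : List String) : (pvMat friends gifts).map pvP = pvNet friends gifts := by
  unfold pvMat pvNet
  rw [matnet_aux (fun info => ((pvIdxs friends).get? ((PySem.Str.split₀ info).getD 0 "")).getD 0)
      (fun info => ((pvIdxs friends).get? ((PySem.Str.split₀ info).getD 1 "")).getD 0) gifts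
      _ (by intro r hr; rw [List.eq_of_mem_replicate hr]; rfl)]
  congr 1
  simp [pvP]

-- Nat-level data accessors and the tournament relation
def pvAt (G : List (List Int)) (g t : Nat) : Int := (G.getD g []).getD t 0

def pvWin (G : List (List Int)) (net : List Int) (g t : Nat) : Bool :=
  decide (pvAt G t g < pvAt G g t) || (decide (pvAt G g t = pvAt G t g) && decide (net.getD t 0 < net.getD g 0))

def pvCnt (G : List (List Int)) (net : List Int) (n g : Nat) : Nat :=
  (List.range n).countP (fun t => decide (g ≠ t) && pvWin G net g t)

lemma pvGet2_natCast (m : List (List Int)) (g t : Nat) : pvGet2 m (g : Int) (t : Int) = pvAt m g t := by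
  simp [pvGet2, pvAt]

lemma pvGet2_col2 (m : List (List Int)) (g : Nat) : pvGet2 m (g : Int) 2 = pvAt m g 2 := by
  have h : (2 : Int) = ((2 : Nat) : Int) := by norm_num
  rw [h, pvGet2_natCast]

lemma pvP_map_getD (M : List (List Int)) (g : Nat) : (M.map pvP).getD g 0 = pvAt M g 2 := by
  have := List.getD_map (l := M) (d := []) (n := g) (f := pvP)
  simpa [pvP, pvAt] using this

lemma pvWin_map (G M : List (List Int)) (g t : Nat) :
    pvWin G (M.map pvP) g t
      = (decide (pvAt G t g < pvAt G g t) || (decide (pvAt G g t = pvAt G t g) && decide (pvAt M t 2 < pvAt M g 2))) := by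
  unfold pvWin
  rw [pvP_map_getD, pvP_map_getD]

lemma A2_spec (G M : List (List Int)) (n : Nat) :
    pvA2 G M n = (List.range n).foldl (fun a g => max a ((pvCnt G (M.map pvP) n g : Nat) : Int)) 0 := by
  unfold pvA2
  simp only [PySem.List.pyRange_zero_nat, List.foldl_map]
  apply PySem.List.foldl_congr_mem
  intro a g _
  congr 1
  have hbody : ∀ (nm : Int), ∀ t ∈ List.range n,
      (if (g : Int) = (t : Int) then nm
       else if pvGet2 G (g : Int) (t : Int) > pvGet2 G (t : Int) (g : Int) then nm + 1
       else if pvGet2 G (g : Int) (t : Int) = pvGet2 G (t : Int) (g : Int) then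
         if pvGet2 M (g : Int) 2 > pvGet2 M (t : Int) 2 then nm + 1 else nm
       else nm)
      = if (decide (g ≠ t) && pvWin G (M.map pvP) g t) = true then nm + 1 else nm := by
    intro nm t _
    by_cases hgt : g = t
    · rw [if_pos (by exact_mod_cast hgt)]; simp [hgt]
    · rw [if_neg (by exact_mod_cast hgt)]
      simp only [pvGet2_natCast, pvGet2_col2, gt_iff_lt]
      by_cases h1 : pvAt G t g < pvAt G g t
      · rw [if_pos h1]; simp [pvWin_map, h1, hgt]
      · rw [if_neg h1]
        by_cases h2 : pvAt G g t = pvAt G t g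
        · rw [if_pos h2]
          by_cases h3 : pvAt M t 2 < pvAt M g 2
          · rw [if_pos h3]; simp [pvWin_map, h2, h3, hgt]
          · rw [if_neg h3]; simp [pvWin_map, h2, h3, hgt]
        · rw [if_neg h2]; simp [pvWin_map, h1, h2, hgt]
  rw [PySem.List.foldl_congr_mem _ _ _ _ hbody, PySem.List.foldl_if_add_one]
  simp [pvCnt]

-- getD through a single modify (generic default)
lemma getD_modify {α : Type} (w : List α) (d0 : α) (k x : Nat) (f : α → α) :
    (w.modify k f).getD x d0 = if x = k ∧ k < w.length then f (w.getD x d0) else w.getD x d0 := by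
  simp only [List.getD_eq_getElem?_getD, List.getElem?_modify]
  by_cases hx : x < w.length
  · rw [List.getElem?_eq_getElem hx]
    by_cases hk : x = k <;> simp [hk] <;> omega
  · rw [List.getElem?_eq_none (by omega)]
    simp; intro h1 h2; omega

-- ---- index dictionary facts ----
lemma idx_fold_prop (P : Int → Prop) :
    ∀ (l : List (Int × String)) (d : PySem.Dict String Int),
      (∀ k v, d.get? k = some v → P v) → (∀ p ∈ l, P p.1) →
      ∀ k v, (l.foldl (fun d p => d.insert p.2 p.1) d).get? k = some v → P v := by
  intro l
  induction l with
  | nil => intro d hd _ k v h; exact hd k v h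
  | cons p l ih =>
    intro d hd hl k v h
    refine ih _ ?_ (fun q hq => hl q (by simp [hq])) k v h
    intro k' v' h'
    rw [PySem.Dict.get?_insert] at h'
    split at h'
    · cases h'; exact hl p (by simp)
    · exact hd _ _ h'

lemma pvIdxs_value_range (friends : List String) (name : String) (v : Int)
    (h : (pvIdxs friends).get? name = some v) : 0 ≤ v ∧ v < (friends.length : Int) := by
  refine idx_fold_prop (fun v => 0 ≤ v ∧ v < (friends.length : Int)) _ _ ?_ ?_ name v h
  · intro k v' h'; rw [PySem.Dict.get?_empty] at h'; cases h'
  · intro p hp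
    rw [PySem.List.mem_enumerate_iff] at hp
    obtain ⟨k, hk, rfl⟩ := hp
    constructor <;> omega

lemma pvIdxs_contains (friends : List String) (name : String) (h : name ∈ friends) :
    ((pvIdxs friends).get? name).isSome := by
  cases hg : (pvIdxs friends).get? name with
  | some v => rfl
  | none =>
    rw [PySem.Dict.get?_eq_none_iff_not_mem_keys] at hg
    exfalso; apply hg
    unfold pvIdxs
    rw [PySem.Dict.keys_foldl_insert_key (key := fun p : Int × String => p.2)]
    rw [PySem.Dict.keys_empty, PySem.Set.update_nil_left, PySem.List.map_snd_enumerate]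
    rw [PySem.Set.mem_ofList]
    exact h

lemma pvIdx_getD_range (friends : List String) (name : String) (h : name ∈ friends) :
    0 ≤ ((pvIdxs friends).get? name).getD 0 ∧ ((pvIdxs friends).get? name).getD 0 < (friends.length : Int) := by
  cases hg : (pvIdxs friends).get? name with
  | some v => exact pvIdxs_value_range friends name v hg
  | none => exact absurd (hg ▸ pvIdxs_contains friends name h) (by simp)

-- under Pre_, every gift line denotes a pair of in-range indices
lemma pvPairF_range (friends gifts : List String) (hpre : Pre_solution friends gifts) :
    ∀ info ∈ gifts, 0 ≤ (pvPairF friends info).1 ∧ (pvPairF friends info).1 < (friends.length : Int)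
      ∧ 0 ≤ (pvPairF friends info).2 ∧ (pvPairF friends info).2 < (friends.length : Int) := by
  intro info hinfo
  obtain ⟨hlen, hmem⟩ := hpre info hinfo
  have h0 : (PySem.Str.split₀ info).getD 0 "" ∈ friends := by
    apply hmem
    have : (PySem.Str.split₀ info).getD 0 "" = (PySem.Str.split₀ info)[0]'(by omega) := by
      rw [List.getD_eq_getElem?_getD, List.getElem?_eq_getElem (by omega)]; rfl
    rw [this]; exact List.getElem_mem _
  have h1 : (PySem.Str.split₀ info).getD 1 "" ∈ friends := by
    apply hmem
    have : (PySem.Str.split₀ info).getD 1 "" = (PySem.Str.split₀ info)[1]'(by omega) := by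
      rw [List.getD_eq_getElem?_getD, List.getElem?_eq_getElem (by omega)]; rfl
    rw [this]; exact List.getElem_mem _
  obtain ⟨a1, a2⟩ := pvIdx_getD_range friends _ h0
  obtain ⟨b1, b2⟩ := pvIdx_getD_range friends _ h1
  exact ⟨a1, a2, b1, b2⟩

-- ---- bridge: A's give matrix holds the pair counts B keeps in cnt ----
lemma rows_mem_modify {n : Nat} {M : List (List Int)} {i : Nat} {g : List Int → List Int}
    (h3 : ∀ r ∈ M, r.length = n) (hg : ∀ r, (g r).length = r.length) :
    ∀ r ∈ M.modify i g, r.length = n := by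
  intro r hr
  rw [List.mem_iff_getElem?] at hr
  obtain ⟨k, hk⟩ := hr
  rw [List.getElem?_modify] at hk
  cases hMk : M[k]? with
  | none => rw [hMk] at hk; simp only [Option.map_eq_map, Option.map_none] at hk; exact absurd hk (by simp)
  | some row =>
    have hrowM : row ∈ M := List.mem_of_getElem? hMk
    rw [hMk] at hk
    simp only [Option.map_eq_map, Option.map_some, Option.some_inj] at hk
    split at hk
    · rw [← hk, hg]; exact h3 _ hrowM
    · rw [← hk]; exact h3 _ hrowM

lemma pvAt_pvUpd2 (M : List (List Int)) (a b : Int) (f : Int → Int) (x y n : Nat)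
    (hM : M.length = n) (hrows : ∀ r ∈ M, r.length = n)
    (ha : 0 ≤ a) (ha2 : a < (n : Int)) (hb : 0 ≤ b) (hb2 : b < (n : Int))
    (hx : x < n) (hy : y < n) :
    pvAt (pvUpd2 M a b f) x y
      = if (a, b) = ((x : Int), (y : Int)) then f (pvAt M x y) else pvAt M x y := by
  unfold pvAt pvUpd2
  rw [getD_modify]
  by_cases hxa : x = a.toNat ∧ a.toNat < M.length
  · rw [if_pos hxa]
    obtain ⟨hxa1, hxa2⟩ := hxa
    have hrowlen : (M.getD x []).length = n := by
      rw [List.getD_eq_getElem?_getD, List.getElem?_eq_getElem (by omega)]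
      exact hrows _ (List.getElem_mem _)
    rw [getD_modify]
    by_cases hyb : y = b.toNat ∧ b.toNat < (M.getD x []).length
    · rw [if_pos hyb, if_pos (by obtain ⟨h1, h2⟩ := hyb; rw [Prod.mk.injEq]; constructor <;> omega)]
    · rw [if_neg hyb, if_neg (by
        intro hc
        apply hyb
        have h1 := congrArg Prod.fst hc
        have h2 := congrArg Prod.snd hc
        simp only at h1 h2
        constructor <;> omega)]
  · rw [if_neg hxa, if_neg (by
      intro hc
      apply hxa
      have h1 := congrArg Prod.fst hc
      simp only at h1
      constructor <;> omega)]

lemma give_fold (ps : List (Int × Int)) (n : Nat)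
    (hps : ∀ p ∈ ps, 0 ≤ p.1 ∧ p.1 < (n : Int) ∧ 0 ≤ p.2 ∧ p.2 < (n : Int)) :
    ∀ (M : List (List Int)), M.length = n → (∀ r ∈ M, r.length = n) →
    ∀ (x y : Nat), x < n → y < n →
    pvAt (ps.foldl (fun m p => pvUpd2 m p.1 p.2 (· + 1)) M) x y
      = pvAt M x y + (ps.count ((x : Int), (y : Int)) : Nat) := by
  induction ps with
  | nil => intro M _ _ x y _ _; simp
  | cons p ps ih =>
    intro M hM hrows x y hx hy
    obtain ⟨h1, h2, h3, h4⟩ := hps p (by simp)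
    have hM' : (pvUpd2 M p.1 p.2 (· + 1)).length = n := by simp [pvUpd2, hM]
    have hrows' : ∀ r ∈ pvUpd2 M p.1 p.2 (· + 1), r.length = n := by
      unfold pvUpd2
      exact rows_mem_modify hrows (fun r => List.length_modify _ _ _)
    rw [List.foldl_cons,
      ih (fun q hq => hps q (by simp [hq])) _ hM' hrows' x y hx hy,
      pvAt_pvUpd2 M p.1 p.2 _ x y n hM hrows h1 h2 h3 h4 hx hy,
      List.count_cons]
    by_cases hp : p = ((x : Int), (y : Int))
    · rw [if_pos (by rw [← hp]), if_pos (by rw [hp]; exact beq_self_eq_true _)]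
      push_cast; ring
    · rw [if_neg (by rw [← Prod.mk.eta (p := p)]; exact hp),
        if_neg (by simpa using hp)]
      push_cast; ring
def pvC (friends gifts : List String) (x y : Nat) : Int :=
  ((gifts.map (pvPairF friends)).count ((x : Int), (y : Int)) : Nat)

lemma pvGive_at (friends gifts : List String) (hpre : Pre_solution friends gifts)
    (x y : Nat) (hx : x < friends.length) (hy : y < friends.length) :
    pvAt (pvGive friends gifts) x y = pvC friends gifts x y := by
  have hrw : pvGive friends gifts
      = (gifts.map (pvPairF friends)).foldl (fun m p => pvUpd2 m p.1 p.2 (· + 1))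
          (List.replicate friends.length (List.replicate friends.length 0)) := by
    rw [List.foldl_map]; rfl
  rw [hrw, pvC,
    give_fold (gifts.map (pvPairF friends)) friends.length
      (by intro p hp
          rw [List.mem_map] at hp
          obtain ⟨info, hinfo, rfl⟩ := hp
          exact pvPairF_range friends gifts hpre info hinfo)
      _ (by simp) (fun r hr => by rw [List.eq_of_mem_replicate hr]; simp) x y hx hy]
  simp [pvAt, hx, hy]

lemma pvCntD_getD (friends gifts : List String) (p : Int × Int) :
    (pvCntD friends gifts).getD p 0 = ((gifts.map (pvPairF friends)).count p : Nat) := by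
  unfold pvCntD
  rw [← List.foldl_map (f := pvPairF friends)
    (g := fun (d : PySem.Dict (Int × Int) Int) k => d.insert k (d.getD k 0 + 1)),
    PySem.Dict.getD_foldl_insert_add_one, PySem.Dict.getD_empty]
  ring

lemma foldl_len {α β : Type} (l : List β) (f : List α → β → List α)
    (h : ∀ w b, (f w b).length = w.length) : ∀ w, (l.foldl f w).length = w.length := by
  induction l with
  | nil => intro w; rfl
  | cons b l ih => intro w; rw [List.foldl_cons, ih, h]

lemma pvNet_length (friends gifts : List String) : (pvNet friends gifts).length = friends.length := by
  unfold pvNet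
  rw [foldl_len _ _ (by intro w b; simp), List.length_replicate]

-- ---- the rank dictionary: less[v] = number of nets strictly below v ----

lemma lessFold :
    ∀ (T P : List Int) (d : PySem.Dict Int Int),
      ((P ++ T).Pairwise (fun a b => a ≤ b)) →
      (∀ u : Int, d.contains u = true ↔ u ∈ P) →
      (∀ u ∈ P, d.getD u 0 = (((P ++ T).countP (fun w => decide (w < u)) : Nat) : Int)) →
      ∀ v ∈ P ++ T,
        ((PySem.List.enumerate T (P.length : Int)).foldl
            (fun (d : PySem.Dict Int Int) p => if d.contains p.2 then d else d.insert p.2 p.1) d).getD v 0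
          = (((P ++ T).countP (fun w => decide (w < v)) : Nat) : Int) := by
  intro T
  induction T with
  | nil =>
    intro P d _ _ h2 v hv
    rw [PySem.List.enumerate_nil]
    exact h2 v (by simpa using hv)
  | cons t T ih =>
    intro P d hpw h1 h2 v hv
    rw [PySem.List.enumerate_cons, List.foldl_cons]
    have hassoc : P ++ t :: T = (P ++ [t]) ++ T := by simp
    have hlen : (P.length : Int) + 1 = ((P ++ [t]).length : Int) := by simp
    have hord1 : ∀ p ∈ P, p ≤ t := by
      have := (List.pairwise_append.mp hpw).2.2
      intro p hp; exact this p hp t (by simp)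
    have hord2 : ∀ w ∈ T, t ≤ w := by
      have := (List.pairwise_append.mp hpw).2.1
      rw [List.pairwise_cons] at this
      exact this.1
    -- key count fact used when t is new
    have hcount : (t ∉ P) → ((P ++ t :: T).countP (fun w => decide (w < t))) = P.length := by
      intro htP
      rw [List.countP_append]
      have hc1 : P.countP (fun w => decide (w < t)) = P.length := by
        rw [List.countP_eq_length]
        intro p hp
        have : p ≠ t := fun h => htP (h ▸ hp)
        have := hord1 p hp
        simp; omega
      have hc2 : (t :: T).countP (fun w => decide (w < t)) = 0 := by
        rw [List.countP_eq_zero]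
        intro w hw
        rcases List.mem_cons.mp hw with rfl | hw'
        · simp
        · have := hord2 w hw'; simp; omega
      omega
    by_cases hct : d.contains t = true
    · -- t seen before: dict unchanged
      rw [if_pos hct, hlen]
      have ht : t ∈ P := (h1 t).mp hct
      have := ih (P ++ [t]) d (by rw [← hassoc]; exact hpw)
        (by intro u; rw [h1 u]; simp only [List.mem_append, List.mem_singleton]
            constructor
            · intro h; exact Or.inl h
            · rintro (h | rfl); exact h; exact ht)
        (by intro u hu
            rw [← hassoc]
            apply h2
            rcases List.mem_append.mp hu with h | h
            · exact h
            · rw [List.mem_singleton] at h; exact h ▸ ht)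
        v (by rw [← hassoc]; simpa using hv)
      rw [this, ← hassoc]
    · -- t is new: insert t ↦ P.length
      rw [if_neg hct, hlen]
      have htP : t ∉ P := fun h => hct ((h1 t).mpr h)
      have := ih (P ++ [t]) (d.insert t (P.length : Int)) (by rw [← hassoc]; exact hpw)
        (by intro u
            rw [PySem.Dict.contains_insert, Bool.or_eq_true, beq_iff_eq, h1 u]
            simp only [List.mem_append, List.mem_singleton]
            tauto)
        (by intro u hu
            rw [← hassoc]
            rcases List.mem_append.mp hu with h | h
            · rw [PySem.Dict.getD_insert, if_neg (fun he => htP (by rw [← he]; exact h)), h2 u h]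
            · rw [List.mem_singleton] at h
              subst h
              rw [PySem.Dict.getD_insert_self, hcount htP])
        v (by rw [← hassoc]; simpa using hv)
      rw [this, ← hassoc]


lemma pvLess_getD (net : List Int) (v : Int) (hv : v ∈ net) :
    (pvLess net).getD v 0 = ((net.countP (fun w => decide (w < v)) : Nat) : Int) := by
  unfold pvLess
  have hS : v ∈ ([] : List Int) ++ PySem.List.sorted net (fun x => x) := by
    simp only [List.nil_append]
    rw [PySem.List.mem_sorted]
    exact hv
  have := lessFold (PySem.List.sorted net (fun x => x)) [] PySem.Dict.empty
    (by simpa using PySem.List.sorted_pairwise net (fun x => x))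
    (by intro u; rw [PySem.Dict.contains_empty]; simp)
    (by intro u hu; cases hu)
    v hS
  simp only [List.nil_append, List.length_nil, Nat.cast_zero] at this
  rw [this, List.Perm.countP_eq _ (PySem.List.sorted_perm net (fun x => x) false)]

lemma pvWins0_getD (net : List Int) (x : Nat) (hx : x < net.length) :
    (pvWins0 net).getD x 0 = ((net.countP (fun u => decide (u < net.getD x 0)) : Nat) : Int) := by
  unfold pvWins0
  have hgx : net.getD x 0 = net[x] := List.getD_eq_getElem _ _ hx
  rw [List.getD_eq_getElem _ 0 (by simpa using hx), List.getElem_map, hgx,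
    pvLess_getD net _ (List.getElem_mem _)]

-- ---- pairs dict keys ----
lemma foldl_if_insert (l : List (Int × Int)) :
    ∀ (d : PySem.Dict (Int × Int) Bool),
      l.foldl (fun d k => if k.1 ≠ k.2 then d.insert (min k.1 k.2, max k.1 k.2) true else d) d
        = (l.filter (fun k => decide (k.1 ≠ k.2))).foldl
            (fun d k => d.insert (min k.1 k.2, max k.1 k.2) true) d := by
  induction l with
  | nil => intro d; rfl
  | cons k l ih =>
    intro d
    rw [List.foldl_cons, List.filter_cons]
    by_cases hk : k.1 ≠ k.2
    · rw [if_pos hk, if_pos (by simpa using hk), List.foldl_cons, ih]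
    · rw [if_neg hk, if_neg (by simpa using hk), ih]

lemma pvPairsD_keys (cnt : PySem.Dict (Int × Int) Int) :
    (pvPairsD cnt).keys
      = PySem.Set.ofList ((cnt.keys.filter (fun k => decide (k.1 ≠ k.2))).map
          (fun k => (min k.1 k.2, max k.1 k.2))) := by
  unfold pvPairsD
  rw [foldl_if_insert,
    PySem.Dict.keys_foldl_insert_key (key := fun k : Int × Int => (min k.1 k.2, max k.1 k.2))
      (f := fun _ _ => true),
    PySem.Dict.keys_empty, PySem.Set.update_nil_left]

lemma pvPairsD_keys_nodup (cnt : PySem.Dict (Int × Int) Int) : (pvPairsD cnt).keys.Nodup := by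
  rw [pvPairsD_keys]; exact PySem.Set.nodup_ofList _

lemma pvCntD_keys (friends gifts : List String) :
    (pvCntD friends gifts).keys = PySem.Set.ofList (gifts.map (pvPairF friends)) := by
  unfold pvCntD
  rw [← List.foldl_map (f := pvPairF friends)
    (g := fun (d : PySem.Dict (Int × Int) Int) k => d.insert k (d.getD k 0 + 1)),
    PySem.Dict.keys_foldl_insert, PySem.Dict.keys_empty, PySem.Set.update_nil_left]

lemma mem_pairsKeys (friends gifts : List String) (p : Int × Int) :
    p ∈ (pvPairsD (pvCntD friends gifts)).keys
      ↔ ∃ k ∈ gifts.map (pvPairF friends), k.1 ≠ k.2 ∧ p = (min k.1 k.2, max k.1 k.2) := by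
  rw [pvPairsD_keys, PySem.Set.mem_ofList, List.mem_map]
  constructor
  · rintro ⟨k, hk, rfl⟩
    rw [List.mem_filter] at hk
    obtain ⟨hk1, hk2⟩ := hk
    rw [pvCntD_keys, PySem.Set.mem_ofList] at hk1
    exact ⟨k, hk1, by simpa using hk2, rfl⟩
  · rintro ⟨k, hk, hne, rfl⟩
    refine ⟨k, ?_, rfl⟩
    rw [List.mem_filter]
    exact ⟨by rw [pvCntD_keys, PySem.Set.mem_ofList]; exact hk, by simpa using hne⟩

-- ---- correction fold, pointwise ----
-- the per-pair per-slot delta the adjustment loop applies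
def pvDelta (cnt : PySem.Dict (Int × Int) Int) (net : List Int) (p : Int × Int) (x : Nat) : Int :=
  if cnt.getD (p.1, p.2) 0 ≠ cnt.getD (p.2, p.1) 0 then
    (if cnt.getD (p.1, p.2) 0 > cnt.getD (p.2, p.1) 0 then (if (x : Int) = p.1 then 1 else 0)
     else (if (x : Int) = p.2 then 1 else 0))
    - (if PySem.List.pyGetD net p.1 0 > PySem.List.pyGetD net p.2 0 then (if (x : Int) = p.1 then 1 else 0)
       else if PySem.List.pyGetD net p.2 0 > PySem.List.pyGetD net p.1 0 then (if (x : Int) = p.2 then 1 else 0)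
       else 0)
  else 0

lemma getD_modify_add (w : List Int) (k x : Nat) (c : Int) :
    (w.modify k (fun y => y + c)).getD x 0 = w.getD x 0 + (if x = k ∧ k < w.length then c else 0) := by
  rw [getD_modify]; split_ifs <;> ring

lemma getD_modify_sub (w : List Int) (k x : Nat) (c : Int) :
    (w.modify k (fun y => y - c)).getD x 0 = w.getD x 0 - (if x = k ∧ k < w.length then c else 0) := by
  rw [getD_modify]; split_ifs <;> ring

lemma adj_step (cnt : PySem.Dict (Int × Int) Int) (net w : List Int) (p : Int × Int) (x : Nat)
    (h1 : 0 ≤ p.1) (h2 : p.1 < (w.length : Int)) (h3 : 0 ≤ p.2) (h4 : p.2 < (w.length : Int)) :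
    (pvAdj cnt net w p).getD x 0 = w.getD x 0 + pvDelta cnt net p x := by
  unfold pvAdj pvDelta
  by_cases hab : cnt.getD (p.1, p.2) 0 ≠ cnt.getD (p.2, p.1) 0
  · rw [if_pos hab, if_pos hab]
    by_cases hAB : cnt.getD (p.1, p.2) 0 > cnt.getD (p.2, p.1) 0
    · rw [if_pos hAB, if_pos hAB]
      by_cases hn1 : PySem.List.pyGetD net p.1 0 > PySem.List.pyGetD net p.2 0
      · rw [if_pos hn1, if_pos hn1, getD_modify_add, getD_modify_sub]
        simp only [List.length_modify]
        split_ifs <;> omega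
      · rw [if_neg hn1, if_neg hn1]
        by_cases hn2 : PySem.List.pyGetD net p.2 0 > PySem.List.pyGetD net p.1 0
        · rw [if_pos hn2, if_pos hn2, getD_modify_add, getD_modify_sub]
          simp only [List.length_modify]
          split_ifs <;> omega
        · rw [if_neg hn2, if_neg hn2, getD_modify_add]
          split_ifs <;> omega
    · rw [if_neg hAB, if_neg hAB]
      by_cases hn1 : PySem.List.pyGetD net p.1 0 > PySem.List.pyGetD net p.2 0
      · rw [if_pos hn1, if_pos hn1, getD_modify_add, getD_modify_sub]
        simp only [List.length_modify]
        split_ifs <;> omega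
      · rw [if_neg hn1, if_neg hn1]
        by_cases hn2 : PySem.List.pyGetD net p.2 0 > PySem.List.pyGetD net p.1 0
        · rw [if_pos hn2, if_pos hn2, getD_modify_add, getD_modify_sub]
          simp only [List.length_modify]
          split_ifs <;> omega
        · rw [if_neg hn2, if_neg hn2, getD_modify_add]
          split_ifs <;> omega
  · rw [if_neg hab, if_neg hab]; ring

lemma pvAdj_length (cnt : PySem.Dict (Int × Int) Int) (net w : List Int) (p : Int × Int) :
    (pvAdj cnt net w p).length = w.length := by
  unfold pvAdj
  dsimp only
  split_ifs <;> simp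

lemma adj_fold (cnt : PySem.Dict (Int × Int) Int) (net : List Int) (ps : List (Int × Int)) :
    ∀ (w : List Int),
    (∀ p ∈ ps, 0 ≤ p.1 ∧ p.1 < (w.length : Int) ∧ 0 ≤ p.2 ∧ p.2 < (w.length : Int)) →
    ∀ (x : Nat),
    (ps.foldl (pvAdj cnt net) w).getD x 0 = w.getD x 0 + ((ps.map (fun p => pvDelta cnt net p x)).sum) := by
  induction ps with
  | nil => intro w _ x; simp
  | cons p ps ih =>
    intro w hps x
    obtain ⟨h1, h2, h3, h4⟩ := hps p (by simp)
    rw [List.foldl_cons,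
      ih (pvAdj cnt net w p) (by
        intro q hq
        rw [pvAdj_length]
        exact hps q (by simp [hq])) x,
      adj_step cnt net w p x h1 h2 h3 h4, List.map_cons, List.sum_cons]
    ring

-- ===== VERDICT-side assembly lemmas =====

-- ---- summation plumbing ----
lemma sum_map_filter_zero {α : Type} (l : List α) (q : α → Bool) (f : α → Int)
    (h : ∀ a ∈ l, q a = false → f a = 0) :
    ((l.filter q).map f).sum = (l.map f).sum := by
  induction l with
  | nil => rfl
  | cons a l ih =>
    rw [List.filter_cons]
    by_cases hq : q a = true
    · rw [if_pos hq, List.map_cons, List.map_cons, List.sum_cons, List.sum_cons,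
        ih (fun b hb => h b (by simp [hb]))]
    · rw [if_neg hq, List.map_cons, List.sum_cons, ih (fun b hb => h b (by simp [hb])),
        h a (by simp) (by simpa using hq)]
      ring

lemma countP_getD (l : List Int) (p : Int → Bool) :
    l.countP p = (List.range l.length).countP (fun t => p (l.getD t 0)) := by
  have hl : l = (List.range l.length).map (fun t => l.getD t 0) := by
    apply List.ext_getElem (by simp)
    intro i h1 h2
    rw [List.getElem_map, List.getElem_range, List.getD_eq_getElem _ _ h1]
  conv_lhs => rw [hl]
  rw [List.countP_map]
  rfl

-- ---- the per-person correction each exchanged pair contributes ----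
def pvCorr (cnt : PySem.Dict (Int × Int) Int) (net : List Int) (x t : Nat) : Int :=
  (if x ≠ t ∧ (cnt.getD ((t : Int), (x : Int)) 0 < cnt.getD ((x : Int), (t : Int)) 0
      ∨ (cnt.getD ((x : Int), (t : Int)) 0 = cnt.getD ((t : Int), (x : Int)) 0
         ∧ net.getD t 0 < net.getD x 0)) then 1 else 0)
  - (if net.getD t 0 < net.getD x 0 then 1 else 0)

def pvPhi (x : Nat) (p : Int × Int) : Nat := if p.1 = (x : Int) then p.2.toNat else p.1.toNat

lemma keyFacts (friends gifts : List String) (hpre : Pre_solution friends gifts) :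
    ∀ p ∈ (pvPairsD (pvCntD friends gifts)).keys,
      0 ≤ p.1 ∧ p.1 < (friends.length : Int) ∧ 0 ≤ p.2 ∧ p.2 < (friends.length : Int) ∧ p.1 < p.2 := by
  intro p hp
  rw [mem_pairsKeys] at hp
  obtain ⟨k, hk, hne, rfl⟩ := hp
  rw [List.mem_map] at hk
  obtain ⟨info, hinfo, rfl⟩ := hk
  obtain ⟨a1, a2, b1, b2⟩ := pvPairF_range friends gifts hpre info hinfo
  refine ⟨?_, ?_, ?_, ?_, ?_⟩
  · exact le_min a1 b1
  · exact lt_of_le_of_lt (min_le_left _ _) a2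
  · exact le_trans a1 (le_max_left _ _)
  · exact max_lt a2 b2
  · exact min_lt_max.mpr hne

lemma phi_shape (friends gifts : List String) (hpre : Pre_solution friends gifts) (x : Nat)
    (p : Int × Int) (hp : p ∈ (pvPairsD (pvCntD friends gifts)).keys)
    (hx : p.1 = (x : Int) ∨ p.2 = (x : Int)) :
    p = (min (x : Int) (pvPhi x p : Int), max (x : Int) (pvPhi x p : Int))
      ∧ pvPhi x p ≠ x ∧ pvPhi x p < friends.length := by
  obtain ⟨h1, h2, h3, h4, h5⟩ := keyFacts friends gifts hpre p hp
  unfold pvPhi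
  rcases hx with hx | hx
  · rw [if_pos hx]
    have hcast : ((p.2.toNat : Nat) : Int) = p.2 := by omega
    refine ⟨?_, by omega, by omega⟩
    rw [Prod.mk.injEq]
    constructor
    · rw [hcast, min_eq_left (by omega), ← hx]
    · rw [hcast, max_eq_right (by omega)]
  · have hne : p.1 ≠ (x : Int) := by omega
    rw [if_neg hne]
    have hcast : ((p.1.toNat : Nat) : Int) = p.1 := by omega
    refine ⟨?_, by omega, by omega⟩
    rw [Prod.mk.injEq]
    constructor
    · rw [hcast, min_eq_right (by omega)]
    · rw [hcast, max_eq_left (by omega), ← hx]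

lemma delta_eq_corr (cnt : PySem.Dict (Int × Int) Int) (net : List Int) (x t : Nat)
    (ht : t ≠ x) :
    pvDelta cnt net (min (x : Int) (t : Int), max (x : Int) (t : Int)) x = pvCorr cnt net x t := by
  unfold pvDelta pvCorr
  by_cases hxt : (x : Int) < (t : Int)
  · rw [show min (x : Int) (t : Int) = (x : Int) from min_eq_left (by omega),
      show max (x : Int) (t : Int) = (t : Int) from max_eq_right (by omega)]
    simp only [PySem.List.pyGetD_natCast]
    split_ifs <;> omega
  · rw [show min (x : Int) (t : Int) = (t : Int) from min_eq_right (by omega),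
      show max (x : Int) (t : Int) = (x : Int) from max_eq_left (by omega)]
    simp only [PySem.List.pyGetD_natCast]
    split_ifs <;> omega

-- the active pair list, seen from person x, is a permutation of the active opponents
lemma active_perm (friends gifts : List String) (hpre : Pre_solution friends gifts) (x : Nat)
    (hx : x < friends.length) :
    (((pvPairsD (pvCntD friends gifts)).keys.filter
        (fun p => decide ((p.1 = (x : Int) ∨ p.2 = (x : Int))
          ∧ (pvCntD friends gifts).getD (p.1, p.2) 0 ≠ (pvCntD friends gifts).getD (p.2, p.1) 0))).map (pvPhi x)).Perm
      ((List.range friends.length).filter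
        (fun t => decide (x ≠ t ∧ (pvCntD friends gifts).getD ((x : Int), (t : Int)) 0
          ≠ (pvCntD friends gifts).getD ((t : Int), (x : Int)) 0))) := by
  apply (List.perm_ext_iff_of_nodup ?_ ?_).mpr
  · -- same members
    intro t
    constructor
    · intro hmem
      rw [List.mem_map] at hmem
      obtain ⟨p, hpA, rfl⟩ := hmem
      rw [List.mem_filter] at hpA
      obtain ⟨hpk, hcond⟩ := hpA
      rw [decide_eq_true_eq] at hcond
      obtain ⟨hor, hneq⟩ := hcond
      obtain ⟨hshape, hne, hlt⟩ := phi_shape friends gifts hpre x p hpk hor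
      rw [List.mem_filter, List.mem_range, decide_eq_true_eq]
      refine ⟨by omega, fun h => hne h.symm, ?_⟩
      have hp1 : p.1 = min (x : Int) (pvPhi x p : Int) := by conv_lhs => rw [hshape]
      have hp2 : p.2 = max (x : Int) (pvPhi x p : Int) := by conv_lhs => rw [hshape]
      by_cases hlt : (x : Int) < (pvPhi x p : Int)
      · rw [hp1, hp2, min_eq_left (by omega), max_eq_right (by omega)] at hneq
        exact hneq
      · rw [hp1, hp2, min_eq_right (by omega), max_eq_left (by omega)] at hneq
        exact hneq.symm
    · intro hmem
      rw [List.mem_filter, List.mem_range, decide_eq_true_eq] at hmem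
      obtain ⟨htn, hxt, hneq⟩ := hmem
      -- some gift was exchanged between x and t in one direction or the other
      have hcx := pvCntD_getD friends gifts ((x : Int), (t : Int))
      have hct := pvCntD_getD friends gifts ((t : Int), (x : Int))
      have hmemk : ((x : Int), (t : Int)) ∈ gifts.map (pvPairF friends)
          ∨ ((t : Int), (x : Int)) ∈ gifts.map (pvPairF friends) := by
        by_contra hcon
        push_neg at hcon
        obtain ⟨hc1, hc2⟩ := hcon
        rw [← List.count_eq_zero] at hc1 hc2
        rw [hc1] at hcx
        rw [hc2] at hct
        exact hneq (by rw [hcx, hct])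
      have hcastne : ((x : Int)) ≠ ((t : Int)) := by omega
      set p : Int × Int := (min (x : Int) (t : Int), max (x : Int) (t : Int)) with hpdef
      have hpk : p ∈ (pvPairsD (pvCntD friends gifts)).keys := by
        rw [mem_pairsKeys]
        rcases hmemk with h | h
        · exact ⟨((x : Int), (t : Int)), h, hcastne, rfl⟩
        · exact ⟨((t : Int), (x : Int)), h, fun hc => hcastne hc.symm,
            by rw [hpdef, Prod.mk.injEq]; exact ⟨(min_comm _ _), (max_comm _ _)⟩⟩
      have hor : p.1 = (x : Int) ∨ p.2 = (x : Int) := by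
        by_cases hlt : (x : Int) < (t : Int)
        · left; rw [hpdef]; exact min_eq_left (by omega)
        · right; rw [hpdef]; exact max_eq_left (by omega)
      have hcnd : (pvCntD friends gifts).getD (p.1, p.2) 0 ≠ (pvCntD friends gifts).getD (p.2, p.1) 0 := by
        by_cases hlt : (x : Int) < (t : Int)
        · rw [hpdef]
          simp only [min_eq_left (le_of_lt hlt), max_eq_right (le_of_lt hlt)]
          exact hneq
        · rw [hpdef]
          simp only [min_eq_right (by omega : (t : Int) ≤ (x : Int)),
            max_eq_left (by omega : (t : Int) ≤ (x : Int))]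
          exact fun hc => hneq hc.symm
      have hphi : pvPhi x p = t := by
        unfold pvPhi
        by_cases hlt : (x : Int) < (t : Int)
        · rw [if_pos (by rw [hpdef]; exact min_eq_left (by omega)), hpdef]
          simp only [max_eq_right (le_of_lt hlt)]
          omega
        · rw [if_neg (by
            rw [hpdef]
            simp only [min_eq_right (by omega : (t : Int) ≤ (x : Int))]
            omega)]
          rw [hpdef]
          simp only [min_eq_right (by omega : (t : Int) ≤ (x : Int))]
          omega
      rw [List.mem_map]
      refine ⟨p, ?_, hphi⟩
      rw [List.mem_filter, decide_eq_true_eq]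
      exact ⟨hpk, hor, hcnd⟩
  · -- nodup of the mapped filtered keys
    apply List.Nodup.map_on
    · intro p hpA q hqA hpq
      rw [List.mem_filter] at hpA hqA
      obtain ⟨hs1, -, -⟩ := phi_shape friends gifts hpre x p hpA.1 (by
        have := hpA.2; rw [decide_eq_true_eq] at this; exact this.1)
      obtain ⟨hs2, -, -⟩ := phi_shape friends gifts hpre x q hqA.1 (by
        have := hqA.2; rw [decide_eq_true_eq] at this; exact this.1)
      rw [hs1, hs2, hpq]
    · exact ((pvPairsD_keys_nodup _).filter _)
  · exact List.nodup_range.filter _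

lemma sum_map_add {α : Type} (l : List α) (f g : α → Int) :
    (l.map (fun a => f a + g a)).sum = (l.map f).sum + (l.map g).sum := by
  induction l with
  | nil => simp
  | cons a l ih => simp [ih]; ring

lemma final_pointwise (friends gifts : List String) (hpre : Pre_solution friends gifts)
    (x : Nat) (hx : x < friends.length) :
    (pvWins0 (pvNet friends gifts)).getD x 0
      + (((pvPairsD (pvCntD friends gifts)).keys.map
          (fun p => pvDelta (pvCntD friends gifts) (pvNet friends gifts) p x)).sum)
      = ((pvCnt (pvGive friends gifts) (pvNet friends gifts) friends.length x : Nat) : Int) := by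
  have hnl : (pvNet friends gifts).length = friends.length := pvNet_length friends gifts
  have hbase := pvWins0_getD (pvNet friends gifts) x (by omega)
  have hfilter := sum_map_filter_zero ((pvPairsD (pvCntD friends gifts)).keys)
    (fun p => decide ((p.1 = (x : Int) ∨ p.2 = (x : Int))
      ∧ (pvCntD friends gifts).getD (p.1, p.2) 0 ≠ (pvCntD friends gifts).getD (p.2, p.1) 0))
    (fun p => pvDelta (pvCntD friends gifts) (pvNet friends gifts) p x)
    (by intro p _ hq
        rw [decide_eq_false_iff_not] at hq
        unfold pvDelta
        dsimp only
        split_ifs <;> omega)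
  have hcong :
      ((pvPairsD (pvCntD friends gifts)).keys.filter
          (fun p => decide ((p.1 = (x : Int) ∨ p.2 = (x : Int))
            ∧ (pvCntD friends gifts).getD (p.1, p.2) 0 ≠ (pvCntD friends gifts).getD (p.2, p.1) 0))).map
        (fun p => pvDelta (pvCntD friends gifts) (pvNet friends gifts) p x)
      = (((pvPairsD (pvCntD friends gifts)).keys.filter
          (fun p => decide ((p.1 = (x : Int) ∨ p.2 = (x : Int))
            ∧ (pvCntD friends gifts).getD (p.1, p.2) 0 ≠ (pvCntD friends gifts).getD (p.2, p.1) 0))).map (pvPhi x)).map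
        (fun t => pvCorr (pvCntD friends gifts) (pvNet friends gifts) x t) := by
    rw [List.map_map]
    apply List.map_congr_left
    intro p hp
    rw [List.mem_filter, decide_eq_true_eq] at hp
    obtain ⟨hpk, hor, -⟩ := hp
    obtain ⟨hshape, hne, -⟩ := phi_shape friends gifts hpre x p hpk hor
    simp only [Function.comp_apply]
    conv_lhs => rw [hshape]
    exact delta_eq_corr _ _ x (pvPhi x p) hne
  have hperm := (active_perm friends gifts hpre x hx).map
    (fun t => pvCorr (pvCntD friends gifts) (pvNet friends gifts) x t)
  have hsum2 := hperm.sum_eq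
  have hfill := sum_map_filter_zero (List.range friends.length)
    (fun t => decide (x ≠ t ∧ (pvCntD friends gifts).getD ((x : Int), (t : Int)) 0
      ≠ (pvCntD friends gifts).getD ((t : Int), (x : Int)) 0))
    (fun t => pvCorr (pvCntD friends gifts) (pvNet friends gifts) x t)
    (by intro t _ hq
        rw [decide_eq_false_iff_not] at hq
        unfold pvCorr
        dsimp only
        by_cases hxt : x = t
        · subst hxt
          split_ifs <;> omega
        · have hc : (pvCntD friends gifts).getD ((x : Int), (t : Int)) 0
              = (pvCntD friends gifts).getD ((t : Int), (x : Int)) 0 := by tauto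
          split_ifs <;> omega)
  have hpt : ∀ t ∈ List.range friends.length,
      (if decide ((pvNet friends gifts).getD t 0 < (pvNet friends gifts).getD x 0) = true then (1 : Int) else 0)
        + pvCorr (pvCntD friends gifts) (pvNet friends gifts) x t
      = (if (decide (x ≠ t) && pvWin (pvGive friends gifts) (pvNet friends gifts) x t) = true then (1 : Int) else 0) := by
    intro t ht
    rw [List.mem_range] at ht
    have hb1 : pvAt (pvGive friends gifts) x t = (pvCntD friends gifts).getD ((x : Int), (t : Int)) 0 := by
      rw [pvGive_at friends gifts hpre x t hx ht, pvCntD_getD]; rfl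
    have hb2 : pvAt (pvGive friends gifts) t x = (pvCntD friends gifts).getD ((t : Int), (x : Int)) 0 := by
      rw [pvGive_at friends gifts hpre t x ht hx, pvCntD_getD]; rfl
    unfold pvCorr pvWin
    rw [hb1, hb2]
    simp only [Bool.and_eq_true, Bool.or_eq_true, decide_eq_true_eq]
    split_ifs <;> omega
  have hsplit := sum_map_add (List.range friends.length)
    (fun t => if decide ((pvNet friends gifts).getD t 0 < (pvNet friends gifts).getD x 0) = true then (1 : Int) else 0)
    (fun t => pvCorr (pvCntD friends gifts) (pvNet friends gifts) x t)
  have hcongr := List.map_congr_left hpt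
  have hc1 := PySem.List.sum_map_ite_one_zero
    (fun t => decide ((pvNet friends gifts).getD t 0 < (pvNet friends gifts).getD x 0)) (List.range friends.length)
  have hc2 := PySem.List.sum_map_ite_one_zero
    (fun t => decide (x ≠ t) && pvWin (pvGive friends gifts) (pvNet friends gifts) x t) (List.range friends.length)
  have hbase2 : (pvWins0 (pvNet friends gifts)).getD x 0
      = (((List.range friends.length).countP
          (fun t => decide ((pvNet friends gifts).getD t 0 < (pvNet friends gifts).getD x 0)) : Nat) : Int) := by
    rw [hbase, countP_getD, hnl]
  have hcnt : ((pvCnt (pvGive friends gifts) (pvNet friends gifts) friends.length x : Nat) : Int)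
      = (((List.range friends.length).countP
          (fun t => decide (x ≠ t) && pvWin (pvGive friends gifts) (pvNet friends gifts) x t) : Nat) : Int) := by
    rfl
  rw [hbase2, hcnt, ← hfilter, hcong, hsum2, hfill, ← hc1, ← hc2, ← (congrArg List.sum hcongr), hsplit]

lemma final_eq (friends gifts : List String) (hpre : Pre_solution friends gifts) :
    pvB2 (pvCntD friends gifts) (pvNet friends gifts)
      = PySem.List.maxD ((List.range friends.length).map
          (fun x => ((pvCnt (pvGive friends gifts) (pvNet friends gifts) friends.length x : Nat) : Int))) id 0 := by
  unfold pvB2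
  congr 1
  have hlen0 : (pvWins0 (pvNet friends gifts)).length = friends.length := by
    unfold pvWins0
    rw [List.length_map, pvNet_length]
  apply List.ext_getElem
  · rw [foldl_len _ _ (fun w p => pvAdj_length _ _ w p), hlen0]
    simp
  · intro i h1 h2
    have hn : i < friends.length := by simpa using h2
    rw [List.getElem_map, List.getElem_range, ← List.getD_eq_getElem _ 0 h1,
      adj_fold (pvCntD friends gifts) (pvNet friends gifts) _ _
        (by intro p hp
            obtain ⟨a1, a2, b1, b2, -⟩ := keyFacts friends gifts hpre p hp
            rw [hlen0]
            exact ⟨a1, a2, b1, b2⟩) i,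
      final_pointwise friends gifts hpre i hn]

lemma foldl_max_eq_maxD (l : List Int) (h : ∀ y ∈ l, 0 ≤ y) : l.foldl max 0 = PySem.List.maxD l id 0 := by
  have key : ∀ (t : List Int) (m : Int), PySem.List.max? (m :: t) id = some (t.foldl max m) := by
    intro t
    induction t with
    | nil => intro m; rfl
    | cons x t ih =>
      intro m
      have step : PySem.List.max? (m :: x :: t) id = PySem.List.max? (max m x :: t) id := by
        simp only [PySem.List.max?, List.foldl_cons]
        congr 1
        by_cases hmx : m < x
        · simp only [id, if_pos hmx, max_eq_right (le_of_lt hmx)]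
        · simp only [id, if_neg hmx, max_eq_left (by omega : x ≤ m)]
      rw [step, ih, List.foldl_cons]
  cases l with
  | nil => rfl
  | cons x t =>
    have hx : (0:Int) ≤ x := h x (by simp)
    rw [List.foldl_cons, max_eq_right hx, PySem.List.maxD, key, Option.getD_some]

-- ===== VERDICT (by name: the statement is the Claim_ definition above) =====
theorem solution_spec : Claim_equal_solution := by
  intro friends gifts _hdom hpre
  unfold Spec_solution
  rw [solution_eq, solution_alt_eq, A2_spec, net_eq, final_eq friends gifts hpre,
    ← List.foldl_map (f := fun x => ((pvCnt (pvGive friends gifts) (pvNet friends gifts) friends.length x : Nat) : Int)) (g := max)]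
  exact foldl_max_eq_maxD _ (by intro y hy; simp at hy; obtain ⟨x, -, hx⟩ := hy; omega)
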